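-- pv_equiv track=rewrite | github.com/TylerK07/bytemap | src/hexmap/widgets/hex_view.py | _render_gutter
-- ===== SOURCE A (Python) =====
-- def _render_gutter(boundaries: dict[int, set[str]], row_start: int, row_end: int) -> str:
--     """Render 2-character gutter marker for a row.
--
--     Checks if any byte in [row_start, row_end) has chunk boundary markers.
--     Priority: start+end (╳), start (╎), end (┆), length (•), none (  )
--     """
--     markers_in_row: set[str] = set()
--     for offset in range(row_start, row_end):
--         if offset in boundaries:
--             markers_in_row.update(boundaries[offset])
--
--     # Combine markers with priority
--     if "start" in markers_in_row and "end" in markers_in_row: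
--         return "╳ "  # Both start and end
--     if "start" in markers_in_row:
--         return "╎ "  # Payload start
--     if "end" in markers_in_row:
--         return "┆ "  # Payload end
--     if "length" in markers_in_row:
--         return "• "  # Length field
--     return "  "  # No marker
-- ===== SOURCE B (Python) =====
-- def _render_gutter(boundaries: dict[int, set[str]], row_start: int, row_end: int) -> str:
--     """Render 2-character gutter marker for a row.
--
--     Scans the sparse boundary dict itself instead of every byte offset of the
--     row window: for each marker name, check whether any boundary entry whose
--     key falls inside [row_start, row_end) carries it.
--     """
--     def has(marker: str) -> bool:
--         return any(marker in ms for off, ms in boundaries.items()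
--                    if row_start <= off < row_end)
--
--     if has("start"):
--         return "╳ " if has("end") else "╎ "
--     if has("end"):
--         return "┆ "
--     if has("length"):
--         return "• "
--     return "  "
-- ===== Notes on version B (the rewrite author's own statement) =====
-- stated objective: simpler
-- what changed: B iterates the sparse boundaries dict and tests each key against the row window with any(), instead of walking every byte offset in range(row_start, row_end) and probing the dict, and it drops the intermediate marker set in favour of per-marker existence tests.
import Mathlib
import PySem

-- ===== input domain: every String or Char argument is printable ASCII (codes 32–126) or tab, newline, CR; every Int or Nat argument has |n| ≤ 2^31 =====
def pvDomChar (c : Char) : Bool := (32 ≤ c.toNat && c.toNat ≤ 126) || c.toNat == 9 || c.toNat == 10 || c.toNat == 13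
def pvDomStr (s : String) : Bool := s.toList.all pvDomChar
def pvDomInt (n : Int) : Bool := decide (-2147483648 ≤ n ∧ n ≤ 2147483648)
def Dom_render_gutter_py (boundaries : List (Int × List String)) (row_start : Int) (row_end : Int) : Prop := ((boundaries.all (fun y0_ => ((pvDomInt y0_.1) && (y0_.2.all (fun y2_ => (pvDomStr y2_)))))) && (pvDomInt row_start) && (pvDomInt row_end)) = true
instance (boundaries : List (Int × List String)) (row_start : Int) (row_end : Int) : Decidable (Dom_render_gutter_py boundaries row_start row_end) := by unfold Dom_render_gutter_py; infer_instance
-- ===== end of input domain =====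

-- B scans the sparse boundaries dict with per-marker any() tests over the row window
-- instead of probing the dict at every byte offset of the window: simpler, no marker set.

-- ===== PORT A =====
def render_gutter_py (boundaries : List (Int × List String)) (row_start : Int) (row_end : Int) : String :=
  let d : PySem.Dict Int (List String) := PySem.Dict.mk boundaries
  let markers : PySem.Set String :=
    (PySem.List.pyRange row_start row_end 1).foldl
      (fun acc offset => if d.contains offset then acc.update (d.getD offset []) else acc)
      PySem.Set.empty
  if markers.contains "start" && markers.contains "end" then "╳ "
  else if markers.contains "start" then "╎ "
  else if markers.contains "end" then "┆ "
  else if markers.contains "length" then "• "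
  else "  "

-- ===== PORT B =====
def render_gutter_py_alt (boundaries : List (Int × List String)) (row_start : Int) (row_end : Int) : String :=
  let has := fun (m : String) =>
    boundaries.any (fun p => (decide (row_start ≤ p.1) && decide (p.1 < row_end)) && p.2.contains m)
  if has "start" then (if has "end" then "╳ " else "╎ ")
  else if has "end" then "┆ "
  else if has "length" then "• "
  else "  "

-- ===== PRECONDITION & SPEC =====
-- Pre_ excludes association lists with duplicate keys: they encode no Python dict
-- (dict keys are unique), so A's first-match lookup there is an artefact of the encoding.
def Pre_render_gutter_py (boundaries : List (Int × List String)) (row_start : Int) (row_end : Int) : Prop :=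
  (boundaries.map Prod.fst).Nodup
instance (boundaries : List (Int × List String)) (row_start : Int) (row_end : Int) : Decidable (Pre_render_gutter_py boundaries row_start row_end) := by unfold Pre_render_gutter_py; infer_instance
def pvWitness_render_gutter_py : (List (Int × List String)) × Int × Int := ([(0, ["start"]), (3, ["end", "length"])], 0, 2)
def Spec_render_gutter_py (boundaries : List (Int × List String)) (row_start : Int) (row_end : Int) (out : String) : Prop := out = render_gutter_py_alt boundaries row_start row_end
instance (boundaries : List (Int × List String)) (row_start : Int) (row_end : Int) (out : String) : Decidable (Spec_render_gutter_py boundaries row_start row_end out) := by unfold Spec_render_gutter_py; infer_instance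

-- ===== CLAIM (what is proved, stated in full; the proofs are below) =====
def Claim_equal_render_gutter_py : Prop := ∀ (boundaries : List (Int × List String)) (row_start : Int) (row_end : Int), Dom_render_gutter_py boundaries row_start row_end → Pre_render_gutter_py boundaries row_start row_end → Spec_render_gutter_py boundaries row_start row_end (render_gutter_py boundaries row_start row_end)

-- ===== LEMMAS AND PROOFS =====

-- Generic characterisation of A's accumulation loop over any offset list.
theorem pv_mem_fold (d : PySem.Dict Int (List String)) (L : List Int)
    (init : PySem.Set String) (y : String) :
    y ∈ L.foldl (fun acc offset => if d.contains offset then acc.update (d.getD offset []) else acc) init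
      ↔ y ∈ init ∨ ∃ off ∈ L, d.contains off = true ∧ y ∈ d.getD off [] := by
  induction L generalizing init with
  | nil => simp
  | cons o rest ih =>
    simp only [List.foldl_cons, List.mem_cons, ih]
    by_cases h : d.contains o = true
    · rw [if_pos h]
      simp only [PySem.Set.mem_update]
      constructor
      · rintro ((hy | hy) | ⟨off, hm, hc, hv⟩)
        · exact Or.inl hy
        · exact Or.inr ⟨o, Or.inl rfl, h, hy⟩
        · exact Or.inr ⟨off, Or.inr hm, hc, hv⟩
      · rintro (hy | ⟨off, (rfl | hm), hc, hv⟩)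
        · exact Or.inl (Or.inl hy)
        · exact Or.inl (Or.inr hv)
        · exact Or.inr ⟨off, hm, hc, hv⟩
    · rw [if_neg h]
      constructor
      · rintro (hy | ⟨off, hm, hc, hv⟩)
        · exact Or.inl hy
        · exact Or.inr ⟨off, Or.inr hm, hc, hv⟩
      · rintro (hy | ⟨off, (rfl | hm), hc, hv⟩)
        · exact Or.inl hy
        · exact absurd hc h
        · exact Or.inr ⟨off, hm, hc, hv⟩

-- With nodup keys, 'offset present with value containing y' ↔ an entry of the list.
theorem pv_lookup_iff (boundaries : List (Int × List String)) (off : Int) (y : String)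
    (hnd : (boundaries.map Prod.fst).Nodup) :
    ((PySem.Dict.mk boundaries).contains off = true ∧ y ∈ (PySem.Dict.mk boundaries).getD off [])
      ↔ ∃ v, (off, v) ∈ boundaries ∧ y ∈ v := by
  constructor
  · rintro ⟨hc, hy⟩
    rw [PySem.Dict.contains_eq_isSome_get?] at hc
    obtain ⟨v, hv⟩ := Option.isSome_iff_exists.mp hc
    refine ⟨v, PySem.Dict.mem_items_of_get?_eq_some _ hv, ?_⟩
    rwa [PySem.Dict.getD_eq_get?_getD, hv] at hy
  · rintro ⟨v, hmem, hy⟩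
    have hget : (PySem.Dict.mk boundaries).get? off = some v :=
      PySem.Dict.get?_of_mem_items _ hmem hnd
    refine ⟨?_, ?_⟩
    · rw [PySem.Dict.contains_eq_isSome_get?, hget]; rfl
    · rwa [PySem.Dict.getD_eq_get?_getD, hget]

-- For each marker name, A's collected set contains it iff B's any()-test fires.
theorem pv_marker_eq (boundaries : List (Int × List String)) (row_start row_end : Int)
    (hnd : (boundaries.map Prod.fst).Nodup) (m : String) :
    (PySem.Set.contains
      ((PySem.List.pyRange row_start row_end 1).foldl
        (fun acc offset => if (PySem.Dict.mk boundaries).contains offset then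
            acc.update ((PySem.Dict.mk boundaries).getD offset []) else acc)
        PySem.Set.empty) m)
    = boundaries.any (fun p => (decide (row_start ≤ p.1) && decide (p.1 < row_end)) && p.2.contains m) := by
  rw [Bool.eq_iff_iff]
  simp only [PySem.Set.contains, List.contains_iff_mem, pv_mem_fold, List.any_eq_true,
    PySem.List.mem_pyRange_one, Bool.and_eq_true, decide_eq_true_eq]
  constructor
  · rintro (h | ⟨off, ⟨h1, h2⟩, hc, hy⟩)
    · simp [PySem.Set.empty] at h
    · obtain ⟨v, hmem, hy⟩ := (pv_lookup_iff boundaries off m hnd).mp ⟨hc, hy⟩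
      exact ⟨(off, v), hmem, ⟨h1, h2⟩, hy⟩
  · rintro ⟨p, hmem, ⟨h1, h2⟩, hy⟩
    refine Or.inr ⟨p.1, ⟨h1, h2⟩, (pv_lookup_iff boundaries p.1 m hnd).mpr ⟨p.2, hmem, hy⟩⟩

-- The two priority cascades agree for every combination of the three flags.
theorem pv_cascade (s e l : Bool) :
    (if s && e then "╳ " else if s then "╎ " else if e then "┆ " else if l then "• " else "  ")
      = (if s then (if e then "╳ " else "╎ ") else if e then "┆ " else if l then "• " else "  ") := by
  cases s <;> cases e <;> simp

-- ===== VERDICT (by name: the statement is the Claim_ definition above) =====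
theorem render_gutter_py_spec : Claim_equal_render_gutter_py := by
  intro boundaries row_start row_end _ hpre
  unfold Spec_render_gutter_py render_gutter_py render_gutter_py_alt
  simp only [pv_marker_eq boundaries row_start row_end hpre]
  exact pv_cascade _ _ _
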